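-- pv_equiv track=rewrite | github.com/JPtheOne/DabblingElectrons | Optimizing electrons.py | calculate_combinations
-- ===== SOURCE A (Python) =====
-- import itertools #Library for the combination method
--
-- def calculate_combinations(electrons): #Function that calculates the different combinations based on the electrons
--
--     possible_combinations = []#List to store the possible combinations that were calculated
--
--     d_orbital = ["2⁺","2⁻", "1⁺","1⁻","0⁺","0⁻","-1⁺","-1⁻","-2⁺","-2⁻"] #String with the d_orbital. It could be modified later...|
--
--     comb_tuples = itertools.combinations(d_orbital,electrons) #Itertools method to calculate combinations based on the orbital and the electron
--
--     #Loop to print all the tuples obtained by the methods and add them to a list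
--     for element in comb_tuples:
--         comb_list = list(element)
--         possible_combinations.append(comb_list)
--     return possible_combinations #Returning the combinations stored on a list
-- ===== SOURCE B (Python) =====
-- def calculate_combinations(electrons):
--     d_orbital = ["2⁺","2⁻", "1⁺","1⁻","0⁺","0⁻","-1⁺","-1⁻","-2⁺","-2⁻"]
--     out = []
--
--     def rec(rest, chosen):
--         if len(chosen) == electrons:
--             out.append(chosen)
--             return
--         if not rest:
--             return
--         rec(rest[1:], chosen + [rest[0]])  # take rest[0]
--         rec(rest[1:], chosen)              # skip rest[0]
--
--     rec(d_orbital, [])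
--     return out
-- ===== Notes on version B (the rewrite author's own statement) =====
-- stated objective: alternative
-- what changed: Replaces the itertools.combinations library call plus a tuple-to-list copy loop with a hand-written take/skip recursion over the fixed 10-element orbital list, emitting each chosen list directly in the same lexicographic-by-index order.
import Mathlib
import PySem

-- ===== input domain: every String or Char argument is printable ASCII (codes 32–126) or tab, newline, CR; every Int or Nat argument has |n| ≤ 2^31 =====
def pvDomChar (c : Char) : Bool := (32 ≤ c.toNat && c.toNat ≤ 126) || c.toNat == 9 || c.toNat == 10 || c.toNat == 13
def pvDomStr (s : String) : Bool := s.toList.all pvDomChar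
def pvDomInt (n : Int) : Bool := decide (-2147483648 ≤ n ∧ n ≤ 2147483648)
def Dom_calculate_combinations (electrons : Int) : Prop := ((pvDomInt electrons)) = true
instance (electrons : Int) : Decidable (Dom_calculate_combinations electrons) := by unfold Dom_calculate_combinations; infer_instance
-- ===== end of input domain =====

-- B replaces the itertools.combinations call by a hand-written take/skip recursion over the
-- fixed 10-element orbital list (objective: alternative, same output order); return value only.

-- ===== PORT A =====
-- itertools.combinations(lst, r), lexicographic by index (the library call, ported as the
-- standard structural combinations function; r is a Nat after the Pre_-guaranteed 0 ≤ electrons)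
def pvCombA (l : List String) (r : Nat) : List (List String) :=
  match r, l with
  | 0, _ => [[]]
  | _ + 1, [] => []
  | r + 1, x :: xs => (pvCombA xs r).map (fun c => x :: c) ++ pvCombA xs (r + 1)

def calculate_combinations (electrons : Int) : List (List String) :=
  let d_orbital := ["2⁺","2⁻","1⁺","1⁻","0⁺","0⁻","-1⁺","-1⁻","-2⁺","-2⁻"]
  -- the loop appending list(element) for each tuple: identity on the list of combinations
  (pvCombA d_orbital electrons.toNat).foldl (fun acc c => acc ++ [c]) []

-- ===== PORT B =====
-- rec(rest, chosen): emit chosen when its length reaches electrons, else take/skip the head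
def pvRecB (electrons : Int) : List String → List String → List (List String)
  | rest, chosen =>
    if (chosen.length : Int) = electrons then [chosen]
    else
      match rest with
      | [] => []
      | x :: xs => pvRecB electrons xs (chosen ++ [x]) ++ pvRecB electrons xs chosen

def calculate_combinations_alt (electrons : Int) : List (List String) :=
  let d_orbital := ["2⁺","2⁻","1⁺","1⁻","0⁺","0⁻","-1⁺","-1⁻","-2⁺","-2⁻"]
  pvRecB electrons d_orbital []

-- ===== PRECONDITION & SPEC =====
-- Pre_ excludes negative electrons, on which Python A raises ValueError (itertools.combinations).
def Pre_calculate_combinations (electrons : Int) : Prop := 0 ≤ electrons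
instance (electrons : Int) : Decidable (Pre_calculate_combinations electrons) := by
  unfold Pre_calculate_combinations; infer_instance
def pvWitness_calculate_combinations : Int := 3

def Spec_calculate_combinations (electrons : Int) (out : List (List String)) : Prop := out = calculate_combinations_alt electrons
instance (electrons : Int) (out : List (List String)) : Decidable (Spec_calculate_combinations electrons out) := by unfold Spec_calculate_combinations; infer_instance

-- ===== CLAIM (what is proved, stated in full; the proofs are below) =====
def Claim_equal_calculate_combinations : Prop := ∀ (electrons : Int), Dom_calculate_combinations electrons → Pre_calculate_combinations electrons → Spec_calculate_combinations electrons (calculate_combinations electrons)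

-- ===== LEMMAS AND PROOFS =====

-- the take/skip recursion computes the suffix combinations, prefixed by the chosen elements
theorem pvRecB_eq (n : Nat) (l chosen : List String) (h : chosen.length ≤ n) :
    pvRecB (n : Int) l chosen = (pvCombA l (n - chosen.length)).map (fun c => chosen ++ c) := by
  induction l generalizing chosen with
  | nil =>
    rw [pvRecB]
    rcases Nat.lt_or_eq_of_le h with hlt | heq
    · have hne : (chosen.length : Int) ≠ (n : Int) := by exact_mod_cast Nat.ne_of_lt hlt
      simp only [if_neg hne]
      obtain ⟨k, hk⟩ := Nat.exists_eq_add_of_lt hlt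
      have : n - chosen.length = k + 1 := by omega
      rw [this]; rfl
    · simp only [heq, if_pos rfl]
      simp [pvCombA]
  | cons x xs ih =>
    rw [pvRecB]
    rcases Nat.lt_or_eq_of_le h with hlt | heq
    · have hne : (chosen.length : Int) ≠ (n : Int) := by exact_mod_cast Nat.ne_of_lt hlt
      simp only [if_neg hne]
      have h1 : (chosen ++ [x]).length ≤ n := by simp; omega
      rw [ih (chosen ++ [x]) h1, ih chosen (Nat.le_of_lt hlt)]
      obtain ⟨k, hk⟩ := Nat.exists_eq_add_of_lt hlt
      have e1 : n - chosen.length = k + 1 := by omega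
      have e2 : n - (chosen ++ [x]).length = k := by simp; omega
      rw [e1, e2, pvCombA]
      simp [List.map_map, Function.comp]
    · simp only [heq, if_pos rfl]
      simp [pvCombA]

theorem foldl_append_id (l : List (List String)) :
    l.foldl (fun acc c => acc ++ [c]) [] = l := by
  have h : ∀ (l acc : List (List String)), l.foldl (fun acc c => acc ++ [c]) acc = acc ++ l := by
    intro l
    induction l with
    | nil => simp
    | cons x xs ih => intro acc; simp [List.foldl, ih]
  simpa using h l []

-- ===== VERDICT (by name: the statement is the Claim_ definition above) =====
theorem calculate_combinations_spec : Claim_equal_calculate_combinations := by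
  intro e _ hpre
  unfold Spec_calculate_combinations calculate_combinations calculate_combinations_alt
  rw [foldl_append_id]
  have he : ((e.toNat : Nat) : Int) = e := Int.toNat_of_nonneg hpre
  have h := pvRecB_eq e.toNat ["2⁺","2⁻","1⁺","1⁻","0⁺","0⁻","-1⁺","-1⁻","-2⁺","-2⁻"] [] (Nat.zero_le _)
  rw [he] at h
  rw [h]
  simp
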